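-- pv_equiv track=rewrite | github.com/RudivanHemert/Gojupedia | docs/extract_hoei_juku_simple.py | organize_content_by_sections
-- ===== SOURCE A (Python) =====
-- def organize_content_by_sections(text):
--     """Organize content into logical sections based on text analysis"""
--     sections = {
--         "introduction": "",
--         "basic_techniques": "",
--         "kata": "",
--         "bunkai": "",
--         "kumite": "",
--         "conditioning": "",
--         "philosophy": "",
--         "terminology": "",
--         "grading": "",
--         "appendix": ""
--     }
--
--     # Split text into pages
--     pages = text.split("--- PAGE")
--
--     for page in pages:
--         if not page.strip():
--             continue
--
--         # Extract page number and content
--         lines = page.strip().split('\n')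
--         if not lines:
--             continue
--
--         page_num = lines[0].replace("---", "").strip()
--         page_content = '\n'.join(lines[1:])
--
--         # Determine section based on content
--         content_lower = page_content.lower()
--
--         if any(word in content_lower for word in ["introduction", "overview", "welcome", "preface"]):
--             sections["introduction"] += f"\n--- PAGE {page_num} ---\n{page_content}"
--         elif any(word in content_lower for word in ["basic", "fundamental", "technique", "stance", "punch", "kick", "block", "strike"]):
--             sections["basic_techniques"] += f"\n--- PAGE {page_num} ---\n{page_content}"
--         elif any(word in content_lower for word in ["kata", "form", "pattern", "sequence", "gekisai", "saifa", "seiyunchin", "shisochin", "sanseru", "sepai", "kururunfa", "seisan", "suparinpei"]):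
--             sections["kata"] += f"\n--- PAGE {page_num} ---\n{page_content}"
--         elif any(word in content_lower for word in ["bunkai", "application", "analysis", "meaning", "self-defense"]):
--             sections["bunkai"] += f"\n--- PAGE {page_num} ---\n{page_content}"
--         elif any(word in content_lower for word in ["kumite", "sparring", "fighting", "combat", "free fighting"]):
--             sections["kumite"] += f"\n--- PAGE {page_num} ---\n{page_content}"
--         elif any(word in content_lower for word in ["conditioning", "fitness", "strength", "endurance", "hojo undo", "exercise"]):
--             sections["conditioning"] += f"\n--- PAGE {page_num} ---\n{page_content}"
--         elif any(word in content_lower for word in ["philosophy", "spirit", "mind", "do", "way", "principles"]):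
--             sections["philosophy"] += f"\n--- PAGE {page_num} ---\n{page_content}"
--         elif any(word in content_lower for word in ["terminology", "glossary", "terms", "vocabulary", "japanese"]):
--             sections["terminology"] += f"\n--- PAGE {page_num} ---\n{page_content}"
--         elif any(word in content_lower for word in ["grading", "belt", "rank", "examination", "test", "kyu", "dan"]):
--             sections["grading"] += f"\n--- PAGE {page_num} ---\n{page_content}"
--         else:
--             sections["appendix"] += f"\n--- PAGE {page_num} ---\n{page_content}"
--
--     return sections
-- ===== SOURCE B (Python) =====
-- SECTION_RULES = [
--     ("introduction", ["introduction", "overview", "welcome", "preface"]),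
--     ("basic_techniques", ["basic", "fundamental", "technique", "stance", "punch", "kick", "block", "strike"]),
--     ("kata", ["kata", "form", "pattern", "sequence", "gekisai", "saifa", "seiyunchin", "shisochin", "sanseru", "sepai", "kururunfa", "seisan", "suparinpei"]),
--     ("bunkai", ["bunkai", "application", "analysis", "meaning", "self-defense"]),
--     ("kumite", ["kumite", "sparring", "fighting", "combat", "free fighting"]),
--     ("conditioning", ["conditioning", "fitness", "strength", "endurance", "hojo undo", "exercise"]),
--     ("philosophy", ["philosophy", "spirit", "mind", "do", "way", "principles"]),
--     ("terminology", ["terminology", "glossary", "terms", "vocabulary", "japanese"]),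
--     ("grading", ["grading", "belt", "rank", "examination", "test", "kyu", "dan"]),
-- ]
--
-- SECTION_NAMES = [name for name, _ in SECTION_RULES] + ["appendix"]
--
--
-- def _classify(content_lower):
--     """First section whose keyword list matches, else the appendix fallback."""
--     for name, words in SECTION_RULES:
--         if any(word in content_lower for word in words):
--             return name
--     return "appendix"
--
--
-- def organize_content_by_sections(text):
--     """Organize content into logical sections based on text analysis"""
--     # Tag every page with its section, then assemble each section in one pass.
--     tagged = []
--     for page in text.split("--- PAGE"):
--         if not page.strip():
--             continue
--         lines = page.strip().split('\n')
--         page_num = lines[0].replace("---", "").strip()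
--         page_content = '\n'.join(lines[1:])
--         tagged.append((_classify(page_content.lower()),
--                        f"\n--- PAGE {page_num} ---\n{page_content}"))
--     return {name: "".join(chunk for s, chunk in tagged if s == name)
--             for name in SECTION_NAMES}
-- ===== Notes on version B (the rewrite author's own statement) =====
-- stated objective: simpler
-- what changed: The ten-branch if/elif ladder that mutates a pre-built dict becomes a declarative rules table: each page is tagged once with the first matching section (appendix fallback), and the result dict is assembled by a group-by comprehension over the section names.
import Mathlib
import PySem

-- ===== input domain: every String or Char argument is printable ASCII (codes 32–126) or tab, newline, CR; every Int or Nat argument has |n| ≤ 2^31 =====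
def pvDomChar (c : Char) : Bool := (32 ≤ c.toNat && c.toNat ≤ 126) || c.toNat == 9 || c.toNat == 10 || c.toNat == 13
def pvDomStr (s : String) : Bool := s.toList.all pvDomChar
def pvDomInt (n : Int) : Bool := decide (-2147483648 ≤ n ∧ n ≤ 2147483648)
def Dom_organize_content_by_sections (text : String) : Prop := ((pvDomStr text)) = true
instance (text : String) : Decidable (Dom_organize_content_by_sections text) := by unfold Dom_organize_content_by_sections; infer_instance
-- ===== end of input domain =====

-- B replaces A's ten-branch if/elif ladder by a rules table (first-match classification with an
-- appendix fallback) and assembles the result dict by a group-by over the section names: simpler.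

-- ===== PORT A =====
-- loop body of A's 'for page in pages' loop
def stepA (sections : PySem.Dict String String) (page : String) : PySem.Dict String String :=
  if PySem.Str.strip page = "" then sections
  else
    match (PySem.Str.split? (PySem.Str.strip page) "\n").getD [] with
    | [] => sections
    | l0 :: rest =>
      let page_num := PySem.Str.strip (PySem.Str.replace l0 "---" "")
      let page_content := PySem.Str.join "\n" rest
      let content_lower := PySem.Str.lower page_content
      let chunk := "\n--- PAGE " ++ page_num ++ " ---\n" ++ page_content
      if (["introduction", "overview", "welcome", "preface"] : List String).any
          (fun w => PySem.Str.isIn w content_lower) then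
        sections.modify "introduction" "" (fun s => s ++ chunk)
      else if (["basic", "fundamental", "technique", "stance", "punch", "kick", "block", "strike"] : List String).any
          (fun w => PySem.Str.isIn w content_lower) then
        sections.modify "basic_techniques" "" (fun s => s ++ chunk)
      else if (["kata", "form", "pattern", "sequence", "gekisai", "saifa", "seiyunchin", "shisochin", "sanseru", "sepai", "kururunfa", "seisan", "suparinpei"] : List String).any
          (fun w => PySem.Str.isIn w content_lower) then
        sections.modify "kata" "" (fun s => s ++ chunk)
      else if (["bunkai", "application", "analysis", "meaning", "self-defense"] : List String).any
          (fun w => PySem.Str.isIn w content_lower) then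
        sections.modify "bunkai" "" (fun s => s ++ chunk)
      else if (["kumite", "sparring", "fighting", "combat", "free fighting"] : List String).any
          (fun w => PySem.Str.isIn w content_lower) then
        sections.modify "kumite" "" (fun s => s ++ chunk)
      else if (["conditioning", "fitness", "strength", "endurance", "hojo undo", "exercise"] : List String).any
          (fun w => PySem.Str.isIn w content_lower) then
        sections.modify "conditioning" "" (fun s => s ++ chunk)
      else if (["philosophy", "spirit", "mind", "do", "way", "principles"] : List String).any
          (fun w => PySem.Str.isIn w content_lower) then
        sections.modify "philosophy" "" (fun s => s ++ chunk)
      else if (["terminology", "glossary", "terms", "vocabulary", "japanese"] : List String).any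
          (fun w => PySem.Str.isIn w content_lower) then
        sections.modify "terminology" "" (fun s => s ++ chunk)
      else if (["grading", "belt", "rank", "examination", "test", "kyu", "dan"] : List String).any
          (fun w => PySem.Str.isIn w content_lower) then
        sections.modify "grading" "" (fun s => s ++ chunk)
      else
        sections.modify "appendix" "" (fun s => s ++ chunk)

def organize_content_by_sections (text : String) : List (String × String) :=
  let sections : PySem.Dict String String := PySem.Dict.ofList
    [("introduction", ""), ("basic_techniques", ""), ("kata", ""), ("bunkai", ""), ("kumite", ""),
     ("conditioning", ""), ("philosophy", ""), ("terminology", ""), ("grading", ""), ("appendix", "")]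
  let pages := (PySem.Str.split? text "--- PAGE").getD []
  (pages.foldl stepA sections).items

-- ===== PORT B =====
def SECTION_RULES : List (String × List String) :=
  [("introduction", ["introduction", "overview", "welcome", "preface"]),
   ("basic_techniques", ["basic", "fundamental", "technique", "stance", "punch", "kick", "block", "strike"]),
   ("kata", ["kata", "form", "pattern", "sequence", "gekisai", "saifa", "seiyunchin", "shisochin", "sanseru", "sepai", "kururunfa", "seisan", "suparinpei"]),
   ("bunkai", ["bunkai", "application", "analysis", "meaning", "self-defense"]),
   ("kumite", ["kumite", "sparring", "fighting", "combat", "free fighting"]),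
   ("conditioning", ["conditioning", "fitness", "strength", "endurance", "hojo undo", "exercise"]),
   ("philosophy", ["philosophy", "spirit", "mind", "do", "way", "principles"]),
   ("terminology", ["terminology", "glossary", "terms", "vocabulary", "japanese"]),
   ("grading", ["grading", "belt", "rank", "examination", "test", "kyu", "dan"])]

def SECTION_NAMES : List String := SECTION_RULES.map Prod.fst ++ ["appendix"]

-- Source B's _classify: first rule whose keyword list matches, else the appendix fallback
def classifyGo (content_lower : String) : List (String × List String) → String
  | [] => "appendix"
  | (name, words) :: rs =>
    if words.any (fun w => PySem.Str.isIn w content_lower) then name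
    else classifyGo content_lower rs

def classify (content_lower : String) : String := classifyGo content_lower SECTION_RULES

-- loop body of Source B's tagging loop
def stepB (tagged : List (String × String)) (page : String) : List (String × String) :=
  if PySem.Str.strip page = "" then tagged
  else
    match (PySem.Str.split? (PySem.Str.strip page) "\n").getD [] with
    | [] => tagged   -- unreachable: str.split never returns an empty list
    | l0 :: rest =>
      let page_num := PySem.Str.strip (PySem.Str.replace l0 "---" "")
      let page_content := PySem.Str.join "\n" rest
      tagged ++ [(classify (PySem.Str.lower page_content),
                  "\n--- PAGE " ++ page_num ++ " ---\n" ++ page_content)]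

-- Source B's final dict comprehension: group the tagged chunks by section name
def assemble (tagged : List (String × String)) : List (String × String) :=
  SECTION_NAMES.map (fun name =>
    (name, PySem.Str.join "" ((tagged.filter (fun q => q.1 == name)).map Prod.snd)))

def organize_content_by_sections_alt (text : String) : List (String × String) :=
  let tagged := ((PySem.Str.split? text "--- PAGE").getD []).foldl stepB []
  assemble tagged

-- ===== PRECONDITION & SPEC =====
def Spec_organize_content_by_sections (text : String) (out : List (String × String)) : Prop := out = organize_content_by_sections_alt text
instance (text : String) (out : List (String × String)) : Decidable (Spec_organize_content_by_sections text out) := by unfold Spec_organize_content_by_sections; infer_instance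

-- ===== CLAIM (what is proved, stated in full; the proofs are below) =====
def Claim_equal_organize_content_by_sections : Prop := ∀ (text : String), Dom_organize_content_by_sections text → Spec_organize_content_by_sections text (organize_content_by_sections text)

-- ===== LEMMAS AND PROOFS =====

-- "".join of one more piece appends that piece
lemma join_empty_snoc (l : List String) (c : String) :
    PySem.Str.join "" (l ++ [c]) = PySem.Str.join "" l ++ c := by
  have h : ∀ (m : List (List Char)), (List.intersperse ([] : List Char) m).flatten = m.flatten := by
    intro m
    induction m with
    | nil => rfl
    | cons a t ih => cases t <;> simp_all [List.intersperse]
  simp [PySem.Str.join, PySem.Chars.join, List.intercalate, h]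

lemma find?_map_self (ns : List String) (g : String → String) (k : String) (hk : k ∈ ns) :
    (ns.map (fun n => (n, g n))).find? (fun p => p.1 == k) = some (k, g k) := by
  induction ns with
  | nil => cases hk
  | cons a t ih =>
    by_cases hak : a = k
    · subst hak; simp
    · have ht : k ∈ t := by
        rcases List.mem_cons.mp hk with h | h
        · exact absurd h.symm hak
        · exact h
      simp [hak, ih ht]

-- sections[k] += c on a dict whose items are ns.map (n, g n)
lemma mkmap_modify (ns : List String) (g : String → String) (k c : String) (hk : k ∈ ns) :
    (PySem.Dict.mk (ns.map (fun n => (n, g n)))).modify k "" (fun s => s ++ c)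
      = PySem.Dict.mk (ns.map (fun n => (n, if n == k then g n ++ c else g n))) := by
  have hcont : (PySem.Dict.mk (ns.map (fun n => (n, g n)))).contains k = true := by
    simp only [PySem.Dict.contains]
    exact List.any_eq_true.mpr ⟨(k, g k), List.mem_map.mpr ⟨k, hk, rfl⟩, by simp⟩
  simp only [PySem.Dict.modify, PySem.Dict.insert, PySem.Dict.getD, PySem.Dict.get?,
    hcont, if_pos, find?_map_self ns g k hk, Option.map_some, Option.getD_some]
  congr 1
  rw [List.map_map]
  apply List.map_congr_left
  intro n _
  by_cases hnk : n = k
  · subst hnk; simp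
  · simp [hnk]

lemma modify_assemble (t : List (String × String)) (k c : String) (hk : k ∈ SECTION_NAMES) :
    (PySem.Dict.mk (assemble t)).modify k "" (fun s => s ++ c)
      = PySem.Dict.mk (assemble (t ++ [(k, c)])) := by
  unfold assemble
  rw [mkmap_modify _ _ _ _ hk]
  congr 1
  apply List.map_congr_left
  intro n _
  by_cases hnk : n = k
  · subst hnk
    simp [List.filter_append, join_empty_snoc]
  · have h1 : (n == k) = false := by simp [hnk]
    have h2 : (k == n) = false := by simp [Ne.symm hnk]
    simp [List.filter_append, h1, h2]

-- A's if/elif ladder applied to a dict in 'assemble' form is one tagged append on B's side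
lemma ladder_eq (t : List (String × String)) (cl ch : String) :
    (if (["introduction", "overview", "welcome", "preface"] : List String).any
        (fun w => PySem.Str.isIn w cl) then
      (PySem.Dict.mk (assemble t)).modify "introduction" "" (fun s => s ++ ch)
    else if (["basic", "fundamental", "technique", "stance", "punch", "kick", "block", "strike"] : List String).any
        (fun w => PySem.Str.isIn w cl) then
      (PySem.Dict.mk (assemble t)).modify "basic_techniques" "" (fun s => s ++ ch)
    else if (["kata", "form", "pattern", "sequence", "gekisai", "saifa", "seiyunchin", "shisochin", "sanseru", "sepai", "kururunfa", "seisan", "suparinpei"] : List String).any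
        (fun w => PySem.Str.isIn w cl) then
      (PySem.Dict.mk (assemble t)).modify "kata" "" (fun s => s ++ ch)
    else if (["bunkai", "application", "analysis", "meaning", "self-defense"] : List String).any
        (fun w => PySem.Str.isIn w cl) then
      (PySem.Dict.mk (assemble t)).modify "bunkai" "" (fun s => s ++ ch)
    else if (["kumite", "sparring", "fighting", "combat", "free fighting"] : List String).any
        (fun w => PySem.Str.isIn w cl) then
      (PySem.Dict.mk (assemble t)).modify "kumite" "" (fun s => s ++ ch)
    else if (["conditioning", "fitness", "strength", "endurance", "hojo undo", "exercise"] : List String).any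
        (fun w => PySem.Str.isIn w cl) then
      (PySem.Dict.mk (assemble t)).modify "conditioning" "" (fun s => s ++ ch)
    else if (["philosophy", "spirit", "mind", "do", "way", "principles"] : List String).any
        (fun w => PySem.Str.isIn w cl) then
      (PySem.Dict.mk (assemble t)).modify "philosophy" "" (fun s => s ++ ch)
    else if (["terminology", "glossary", "terms", "vocabulary", "japanese"] : List String).any
        (fun w => PySem.Str.isIn w cl) then
      (PySem.Dict.mk (assemble t)).modify "terminology" "" (fun s => s ++ ch)
    else if (["grading", "belt", "rank", "examination", "test", "kyu", "dan"] : List String).any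
        (fun w => PySem.Str.isIn w cl) then
      (PySem.Dict.mk (assemble t)).modify "grading" "" (fun s => s ++ ch)
    else
      (PySem.Dict.mk (assemble t)).modify "appendix" "" (fun s => s ++ ch))
    = PySem.Dict.mk (assemble (t ++ [(classify cl, ch)])) := by
  unfold classify SECTION_RULES
  simp only [classifyGo]
  split_ifs <;> exact modify_assemble t _ ch (by decide)

lemma stepAB (t : List (String × String)) (p : String) :
    stepA (PySem.Dict.mk (assemble t)) p = PySem.Dict.mk (assemble (stepB t p)) := by
  unfold stepA stepB
  by_cases hs : PySem.Str.strip p = ""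
  · rw [if_pos hs, if_pos hs]
  · rw [if_neg hs, if_neg hs]
    cases hsp : (PySem.Str.split? (PySem.Str.strip p) "\n").getD [] with
    | nil => rfl
    | cons l0 rest =>
      exact ladder_eq t
        (PySem.Str.lower (PySem.Str.join "\n" rest))
        ("\n--- PAGE " ++ PySem.Str.strip (PySem.Str.replace l0 "---" "") ++ " ---\n" ++ PySem.Str.join "\n" rest)

lemma fold_inv (pages : List String) :
    ∀ t, (pages.foldl stepA (PySem.Dict.mk (assemble t))).items = assemble (pages.foldl stepB t) := by
  induction pages with
  | nil => intro t; rfl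
  | cons p ps ih => intro t; rw [List.foldl_cons, List.foldl_cons, stepAB]; exact ih _

lemma init_eq :
    (PySem.Dict.ofList
      [("introduction", ""), ("basic_techniques", ""), ("kata", ""), ("bunkai", ""), ("kumite", ""),
       ("conditioning", ""), ("philosophy", ""), ("terminology", ""), ("grading", ""), ("appendix", "")]
      : PySem.Dict String String) = PySem.Dict.mk (assemble []) := by decide

-- ===== VERDICT (by name: the statement is the Claim_ definition above) =====
theorem organize_content_by_sections_spec : Claim_equal_organize_content_by_sections := by
  intro text _
  unfold Spec_organize_content_by_sections
  unfold organize_content_by_sections organize_content_by_sections_alt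
  rw [init_eq]
  exact fold_inv _ []
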